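-- pv_equiv track=rewrite | github.com/aorursy/new-nb-6 | rootofarch_roberta-w-preprocessing.py | stringtowords
-- ===== SOURCE A (Python) =====
-- def stringtowords(text, selected_text):
--
--     text_words = str(text).lower().split()
--
--     selected_text_words = str(selected_text).lower().split()
--
--     selected_length = len(selected_text_words)
--
--     start_char = "".join(text_words).find("".join(selected_text_words))
--
--     if(start_char >= 0 and selected_length > 0):
--
--         remaining_char = start_char
--
--         for i,word in enumerate(text_words):
--
--             remaining_char-=len(word)
--
--             if remaining_char < 0:
--
--                 selected_text_words = text_words[i:i+selected_length]
--
--                 break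
--
--
--
--     text_word_numbers = [i for i in range(len(text_words))]
--
--     return text_words, text_word_numbers ,selected_text_words
-- ===== SOURCE B (Python) =====
-- from bisect import bisect_right
-- from itertools import accumulate
--
--
-- def stringtowords(text, selected_text):
--     text_words = str(text).lower().split()
--     selected_text_words = str(selected_text).lower().split()
--     selected_length = len(selected_text_words)
--     start_char = "".join(text_words).find("".join(selected_text_words))
--     if start_char >= 0 and selected_length > 0:
--         cumsum = list(accumulate(len(word) for word in text_words))
--         i = bisect_right(cumsum, start_char)
--         selected_text_words = text_words[i:i + selected_length]
--     text_word_numbers = list(range(len(text_words)))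
--     return text_words, text_word_numbers, selected_text_words
-- ===== Notes on version B (the rewrite author's own statement) =====
-- stated objective: alternative
-- what changed: Replaces A's decrementing linear walk over the words with an inclusive cumulative-length prefix table plus a bisect_right binary search to locate the word covering start_char.
import Mathlib
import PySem

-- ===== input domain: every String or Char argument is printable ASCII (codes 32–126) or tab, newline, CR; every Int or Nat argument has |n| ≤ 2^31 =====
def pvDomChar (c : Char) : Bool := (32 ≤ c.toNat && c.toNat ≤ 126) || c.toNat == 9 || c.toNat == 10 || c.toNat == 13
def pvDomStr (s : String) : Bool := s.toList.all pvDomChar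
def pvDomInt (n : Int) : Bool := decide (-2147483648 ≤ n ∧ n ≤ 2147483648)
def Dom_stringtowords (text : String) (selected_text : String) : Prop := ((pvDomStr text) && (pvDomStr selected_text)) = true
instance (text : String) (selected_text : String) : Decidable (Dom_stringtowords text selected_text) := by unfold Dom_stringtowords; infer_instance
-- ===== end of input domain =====

-- B replaces A's decrementing linear walk to the covering word with a cumulative-length
-- prefix table plus bisect_right lookup (alternative decomposition, no speed claim).

-- ===== PORT A =====
-- A's for-loop with break: walks the words, decrementing remaining_char by each word's
-- length; on the first word where it goes negative, takes text_words[i:i+selected_length].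
def pvLoopA (all : List String) (selLen : Nat) : List String → Nat → Int → List String → List String
  | [], _, _, sel => sel
  | w :: rest, i, remaining, sel =>
    let r := remaining - PySem.Str.len w
    if r < 0 then PySem.List.slice all (some (i : Int)) (some ((i : Int) + (selLen : Int)))
    else pvLoopA all selLen rest (i + 1) r sel

def stringtowords (text : String) (selected_text : String) : List String × List Int × List String :=
  let text_words := PySem.Str.split₀ (PySem.Str.lower text)
  let selected_text_words := PySem.Str.split₀ (PySem.Str.lower selected_text)
  let selected_length := selected_text_words.length
  let start_char := PySem.Str.find (PySem.Str.join "" text_words) (PySem.Str.join "" selected_text_words)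
  let sel :=
    if 0 ≤ start_char ∧ 0 < selected_length then
      pvLoopA text_words selected_length text_words 0 start_char selected_text_words
    else selected_text_words
  let text_word_numbers := PySem.List.pyRange 0 (text_words.length : Int) 1
  (text_words, text_word_numbers, sel)

-- ===== PORT B =====
-- list(accumulate(len(word) for word in text_words)): inclusive prefix sums of word lengths.
def pvCumsum (ws : List String) : List Int :=
  (ws.foldl (fun (st : List Int × Int) w =>
      let t := st.2 + PySem.Str.len w
      (st.1 ++ [t], t)) ([], 0)).1

def stringtowords_alt (text : String) (selected_text : String) : List String × List Int × List String :=
  let text_words := PySem.Str.split₀ (PySem.Str.lower text)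
  let selected_text_words := PySem.Str.split₀ (PySem.Str.lower selected_text)
  let selected_length := selected_text_words.length
  let start_char := PySem.Str.find (PySem.Str.join "" text_words) (PySem.Str.join "" selected_text_words)
  let sel :=
    if 0 ≤ start_char ∧ 0 < selected_length then
      let cumsum := pvCumsum text_words
      let i := PySem.List.bisectRight cumsum start_char
      PySem.List.slice text_words (some (i : Int)) (some ((i : Int) + (selected_length : Int)))
    else selected_text_words
  let text_word_numbers := PySem.List.pyRange 0 (text_words.length : Int) 1
  (text_words, text_word_numbers, sel)

-- ===== PRECONDITION & SPEC =====
def Spec_stringtowords (text : String) (selected_text : String) (out : List String × List Int × List String) : Prop := out = stringtowords_alt text selected_text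
instance (text : String) (selected_text : String) (out : List String × List Int × List String) : Decidable (Spec_stringtowords text selected_text out) := by unfold Spec_stringtowords; infer_instance

-- ===== CLAIM (what is proved, stated in full; the proofs are below) =====
def Claim_equal_stringtowords : Prop := ∀ (text : String) (selected_text : String), Dom_stringtowords text selected_text → Spec_stringtowords text selected_text (stringtowords text selected_text)

-- ===== LEMMAS AND PROOFS =====

-- inclusive prefix sum of the word lengths of ws, through index j-1
def pvS (ws : List String) (j : Nat) : Int := ((ws.map PySem.Str.len).take j).sum

-- index of the first word on which A's remaining counter goes negative
def pvFirst : List String → Int → Option Nat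
  | [], _ => none
  | w :: rest, rem =>
    if rem - PySem.Str.len w < 0 then some 0
    else (pvFirst rest (rem - PySem.Str.len w)).map (· + 1)

theorem pvLoopA_eq_first (all : List String) (selLen : Nat) :
    ∀ (ws : List String) (i : Nat) (rem : Int) (sel : List String),
      pvLoopA all selLen ws i rem sel =
        match pvFirst ws rem with
        | some k => PySem.List.slice all (some ((i + k : Nat) : Int)) (some (((i + k : Nat) : Int) + (selLen : Int)))
        | none => sel := by
  intro ws
  induction ws with
  | nil => intro i rem sel; simp [pvLoopA, pvFirst]
  | cons w rest ih =>
    intro i rem sel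
    have hlw : PySem.Str.len w = (w.length : Int) := by simp [PySem.Str.len]
    simp only [pvLoopA, pvFirst, hlw]
    by_cases h : rem - (w.length : Int) < 0
    · simp [h]
    · simp only [if_neg h]
      rw [ih]
      cases hf : pvFirst rest (rem - (w.length : Int)) with
      | none => simp
      | some k =>
        simp only [Option.map_some]
        congr 2 <;> push_cast <;> omega

theorem pvFirst_of_bounds :
    ∀ (ws : List String) (rem : Int) (k : Nat),
      k < ws.length → rem < pvS ws (k + 1) → (∀ j < k, pvS ws (j + 1) ≤ rem) →
      pvFirst ws rem = some k := by
  intro ws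
  induction ws with
  | nil => intro rem k hk; simp at hk
  | cons w rest ih =>
    intro rem k hk hS hj
    have hlw : PySem.Str.len w = (w.length : Int) := by simp [PySem.Str.len]
    have hS1 : pvS (w :: rest) 1 = (w.length : Int) := by simp [pvS, PySem.Str.len]
    have hcons : ∀ m, pvS (w :: rest) (m + 1) = (w.length : Int) + pvS rest m := by
      intro m; simp [pvS, PySem.Str.len]
    by_cases h : rem - (w.length : Int) < 0
    · have hk0 : k = 0 := by
        by_contra hne
        have := hj 0 (Nat.pos_of_ne_zero hne)
        rw [hS1] at this; omega
      simp [pvFirst, h, hk0]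
    · have hk0 : k ≠ 0 := by
        intro h0
        subst h0
        rw [show pvS (w :: rest) (0 + 1) = (w.length : Int) + pvS rest 0 from hcons 0] at hS
        simp [pvS] at hS
        omega
      obtain ⟨k', rfl⟩ := Nat.exists_eq_succ_of_ne_zero hk0
      have h1 : k' < rest.length := by simpa using hk
      have h2 : rem - (w.length : Int) < pvS rest (k' + 1) := by
        have := hS; rw [hcons (k' + 1)] at this; omega
      have h3 : ∀ j < k', pvS rest (j + 1) ≤ rem - (w.length : Int) := by
        intro j hjk
        have := hj (j + 1) (by omega)
        rw [hcons (j + 1)] at this; omega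
      simp [pvFirst, h, ih _ _ h1 h2 h3]

-- pvCumsum unfolds to the cons form of prefix sums
theorem pvCumsum_foldl_aux :
    ∀ (ws : List String) (acc : List Int) (t : Int),
      (ws.foldl (fun (st : List Int × Int) w =>
        let t := st.2 + PySem.Str.len w
        (st.1 ++ [t], t)) (acc, t)).1 = acc ++ (pvCumsum ws).map (t + ·) := by
  intro ws
  induction ws with
  | nil => intro acc t; simp [pvCumsum]
  | cons w rest ih =>
    intro acc t
    have h2 : pvCumsum (w :: rest) = (0 + PySem.Str.len w) :: (pvCumsum rest).map ((0 + PySem.Str.len w) + ·) := by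
      conv_lhs => unfold pvCumsum
      simp only [List.foldl_cons]
      rw [ih]
      simp
    simp only [List.foldl_cons]
    rw [ih, h2]
    simp [add_assoc]

theorem pvCumsum_cons (w : String) (rest : List String) :
    pvCumsum (w :: rest) = PySem.Str.len w :: (pvCumsum rest).map (PySem.Str.len w + ·) := by
  conv_lhs => unfold pvCumsum
  simp only [List.foldl_cons]
  rw [pvCumsum_foldl_aux]
  simp

theorem pvCumsum_length (ws : List String) : (pvCumsum ws).length = ws.length := by
  induction ws with
  | nil => simp [pvCumsum]
  | cons w rest ih => rw [pvCumsum_cons]; simp [ih]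

theorem pvCumsum_getElem (ws : List String) :
    ∀ (j : Nat) (h : j < ws.length),
      (pvCumsum ws)[j]'(by rw [pvCumsum_length]; exact h) = pvS ws (j + 1) := by
  induction ws with
  | nil => intro j h; simp at h
  | cons w rest ih =>
    intro j h
    rw [List.getElem_of_eq (pvCumsum_cons w rest)]
    cases j with
    | zero => simp [pvS]
    | succ j' =>
      have hj' : j' < rest.length := by simpa using h
      simp only [List.getElem_cons_succ, List.getElem_map]
      rw [ih j' hj']
      simp [pvS]

theorem pvCumsum_nonneg (ws : List String) : ∀ x ∈ pvCumsum ws, 0 ≤ x := by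
  induction ws with
  | nil => simp [pvCumsum]
  | cons w rest ih =>
    rw [pvCumsum_cons]
    intro x hx
    have hw : 0 ≤ PySem.Str.len w := by simp [PySem.Str.len]
    rcases List.mem_cons.mp hx with h | h
    · omega
    · simp only [List.mem_map] at h
      obtain ⟨y, hy, rfl⟩ := h
      have := ih y hy
      omega

theorem pvCumsum_pairwise (ws : List String) : (pvCumsum ws).Pairwise (· ≤ ·) := by
  induction ws with
  | nil => simp [pvCumsum]
  | cons w rest ih =>
    rw [pvCumsum_cons]
    refine List.Pairwise.cons ?_ ?_
    · intro x hx
      simp only [List.mem_map] at hx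
      obtain ⟨y, hy, rfl⟩ := hx
      have := pvCumsum_nonneg rest y hy
      omega
    · exact (List.pairwise_map.mpr (ih.imp (by intro a b h; omega)))

-- "".join with empty separator is flatten
theorem pv_join_nil_eq_flatten (l : List (List Char)) : PySem.Chars.join [] l = l.flatten := by
  unfold PySem.Chars.join
  induction l with
  | nil => simp [List.intercalate]
  | cons a rest ih =>
    cases rest with
    | nil => simp [List.intercalate]
    | cons b t =>
      simp only [List.intercalate] at *
      simp [List.intersperse] at *
      simpa using ih

-- the total prefix sum is the length of the join of all words
theorem pvS_total (ws : List String) :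
    pvS ws ws.length = ((PySem.Str.join "" ws).toList.length : Int) := by
  rw [PySem.Str.toList_join]
  simp only [String.toList_empty]
  rw [pv_join_nil_eq_flatten, List.length_flatten]
  unfold pvS
  rw [List.take_of_length_le (by simp)]
  induction ws with
  | nil => simp
  | cons w rest ih => simp [PySem.Str.len, ih]

-- every word produced by s.split() is nonempty
theorem pv_split₀_go_ne_nil :
    ∀ (s cur : List Char) (acc : List (List Char)),
      (∀ a ∈ acc, a ≠ []) → (cur = [] ∨ cur.reverse ≠ []) →
      ∀ w ∈ PySem.Chars.split₀.go s cur acc, w ≠ [] := by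
  intro s
  induction s with
  | nil =>
    intro cur acc hacc hcur w hw
    unfold PySem.Chars.split₀.go at hw
    by_cases hc : cur.isEmpty
    · rw [if_pos hc] at hw
      exact hacc w (by simpa using hw)
    · rw [if_neg hc] at hw
      rw [List.mem_reverse] at hw
      rcases List.mem_cons.mp hw with h | h
      · subst h
        rcases hcur with h0 | h0
        · subst h0; simp at hc
        · exact h0
      · exact hacc w h
  | cons c rest ih =>
    intro cur acc hacc hcur w hw
    unfold PySem.Chars.split₀.go at hw
    by_cases hsp : PySem.Chars.isspace c
    · rw [if_pos hsp] at hw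
      by_cases hc : cur.isEmpty
      · rw [if_pos hc] at hw
        exact ih [] acc hacc (Or.inl rfl) w hw
      · rw [if_neg hc] at hw
        refine ih [] (cur.reverse :: acc) ?_ (Or.inl rfl) w hw
        intro a ha
        rcases List.mem_cons.mp ha with h | h
        · subst h
          simp only [ne_eq, List.reverse_eq_nil_iff]
          intro h0; subst h0; simp at hc
        · exact hacc a h
    · rw [if_neg hsp] at hw
      exact ih (c :: cur) acc hacc (Or.inr (by simp)) w hw

theorem pv_split₀_ne_nil (s : String) : ∀ w ∈ PySem.Str.split₀ s, w.toList ≠ [] := by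
  intro w hw
  have hmem : w.toList ∈ List.map String.toList (PySem.Str.split₀ s) := List.mem_map_of_mem hw
  rw [PySem.Str.split₀_map_toList] at hmem
  exact pv_split₀_go_ne_nil s.toList [] [] (by simp) (Or.inl rfl) _ hmem

theorem pv_flatten_ne_nil {l : List (List Char)} (h0 : l ≠ []) (h1 : ∀ x ∈ l, x ≠ []) :
    l.flatten ≠ [] := by
  cases l with
  | nil => exact absurd rfl h0
  | cons a rest =>
    have ha : a ≠ [] := h1 a (by simp)
    simp only [List.flatten_cons, ne_eq, List.append_eq_nil_iff]
    intro ⟨h, _⟩; exact ha h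

-- under A's guard, the selected text really occurs strictly inside the joined words
theorem pv_start_lt_total (tws sws : List String)
    (hsw : ∀ w ∈ sws, w.toList ≠ [])
    (hlen : 0 < sws.length)
    (hfind : 0 ≤ PySem.Str.find (PySem.Str.join "" tws) (PySem.Str.join "" sws)) :
    PySem.Str.find (PySem.Str.join "" tws) (PySem.Str.join "" sws) < pvS tws tws.length := by
  rw [PySem.Str.find_eq] at hfind ⊢
  have hspec := PySem.Chars.find_spec hfind
  have hne : (PySem.Str.join "" sws).toList ≠ [] := by
    rw [PySem.Str.toList_join]
    simp only [String.toList_empty]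
    rw [pv_join_nil_eq_flatten]
    apply pv_flatten_ne_nil
    · simp only [ne_eq, List.map_eq_nil_iff]
      intro h; rw [h] at hlen; simp at hlen
    · intro x hx
      simp only [List.mem_map] at hx
      obtain ⟨w, hw, rfl⟩ := hx
      exact hsw w hw
  have hdrop : (PySem.Str.join "" tws).toList.drop
      (PySem.Chars.find (PySem.Str.join "" tws).toList (PySem.Str.join "" sws).toList).toNat ≠ [] := by
    intro hd
    have := hspec.1
    rw [hd] at this
    exact hne (List.prefix_nil.mp this)
  have hlt : (PySem.Chars.find (PySem.Str.join "" tws).toList (PySem.Str.join "" sws).toList).toNat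
      < (PySem.Str.join "" tws).toList.length := by
    by_contra hge
    exact hdrop (List.drop_eq_nil_of_le (by omega))
  rw [pvS_total]
  omega

-- the binary-search index is exactly the first index where A's counter goes negative
theorem pv_first_eq_bisect (ws : List String) (sc : Int)
    (h0 : 0 ≤ sc) (hlt : sc < pvS ws ws.length) :
    pvFirst ws sc = some (PySem.List.bisectRight (pvCumsum ws) sc) := by
  obtain ⟨hle, hlo, hhi⟩ := PySem.List.bisectRight_spec (pvCumsum ws) sc (pvCumsum_pairwise ws)
  set r := PySem.List.bisectRight (pvCumsum ws) sc with hr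
  have hlen := pvCumsum_length ws
  have hwsne : ws.length ≠ 0 := by
    intro h
    rw [h] at hlt
    simp [pvS] at hlt
    omega
  have hrlt : r < ws.length := by
    by_contra hge
    have hreq : ws.length - 1 < (pvCumsum ws).length := by omega
    have := hlo (ws.length - 1) hreq (by omega)
    rw [pvCumsum_getElem ws (ws.length - 1) (by omega)] at this
    have heq : ws.length - 1 + 1 = ws.length := by omega
    rw [heq] at this
    omega
  apply pvFirst_of_bounds ws sc r hrlt
  · have := hhi r (by omega) (by omega)
    rw [pvCumsum_getElem ws r hrlt] at this
    omega
  · intro j hj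
    have := hlo j (by omega) hj
    rw [pvCumsum_getElem ws j (by omega)] at this
    omega

-- ===== VERDICT (by name: the statement is the Claim_ definition above) =====
set_option maxHeartbeats 1000000 in
theorem stringtowords_spec : Claim_equal_stringtowords := by
  intro text selected_text _
  unfold Spec_stringtowords stringtowords stringtowords_alt
  dsimp only
  set tws := PySem.Str.split₀ (PySem.Str.lower text) with htws
  set sws := PySem.Str.split₀ (PySem.Str.lower selected_text) with hsws
  set sc := PySem.Str.find (PySem.Str.join "" tws) (PySem.Str.join "" sws) with hsc
  by_cases hg : 0 ≤ sc ∧ 0 < sws.length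
  · rw [if_pos hg, if_pos hg]
    rw [pvLoopA_eq_first]
    have hlt : sc < pvS tws tws.length :=
      pv_start_lt_total tws sws (pv_split₀_ne_nil _) hg.2 hg.1
    rw [pv_first_eq_bisect tws sc hg.1 hlt]
    simp only [Nat.zero_add]
  · rw [if_neg hg, if_neg hg]
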